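-- pv_equiv track=rewrite | github.com/usman1515/sorting_network_generator | scripts/template_processor.py | __list_points_in_distance
-- ===== SOURCE A (Python) =====
-- def __list_points_in_distance(
--     start_point: tuple[int, int], dist=int, bounds=tuple[int, int]
-- ) -> list[tuple[int, int]]:
--     """Returns a list of 2D points around the start_point with the distance
--     given. Will return an empty list of no points exist in bounds.
--
--     Diagonals are treated as equidistand.
--     """
--     if dist == 0:
--         return [
--             start_point,
--         ]
--     s_x, s_y = start_point
--     points = []
--     for i in range(0, 2 * dist - 1):
--         x = s_x - dist + i
--         y = s_y - dist
--         if x > 0 and x < bounds[0]: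
--             if y > 0 and y < bounds[1]:
--                 points.append((x, y))
--     for i in range(0, 2 * dist - 1):
--         x = s_x + dist - 1
--         y = s_y - dist + i
--         if x > 0 and x < bounds[0]:
--             if y > 0 and y < bounds[1]:
--                 points.append((x, y))
--     for i in range(2 * dist - 1, 0, -1):
--         x = s_x - dist + i
--         y = s_y + dist - 1
--         if x > 0 and x < bounds[0]:
--             if y > 0 and y < bounds[1]:
--                 points.append((x, y))
--     for i in range(2 * dist - 1, 0, -1):
--         x = s_x - dist
--         y = s_y - dist + i
--         if x > 0 and x < bounds[0]:
--             if y > 0 and y < bounds[1]: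
--                 points.append((x, y))
--     return points
-- ===== SOURCE B (Python) =====
-- def __list_points_in_distance(
--     start_point: tuple[int, int], dist=int, bounds=tuple[int, int]
-- ) -> list[tuple[int, int]]:
--     """Rotation-based construction: build only the unfiltered top side, derive
--     the other three sides by repeated 90-degree clockwise rotation about the
--     ring's centre, then filter the whole ring against the bounds once."""
--     if dist == 0:
--         return [start_point]
--     s_x, s_y = start_point
--
--     def rot(p):
--         # 90-degree clockwise rotation about the ring centre (s_x-1/2, s_y-1/2)
--         x, y = p
--         return (s_x + s_y - 1 - y, s_y - s_x + x)
--
--     side = [(s_x - dist + i, s_y - dist) for i in range(2 * dist - 1)]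
--     ring = side
--     for _ in range(3):
--         side = [rot(p) for p in side]
--         ring = ring + side
--     return [(x, y) for (x, y) in ring if 0 < x < bounds[0] and 0 < y < bounds[1]]
-- ===== Notes on version B (the rewrite author's own statement) =====
-- stated objective: alternative
-- what changed: Instead of four hand-coded coordinate-formula loops each with its own inline bounds test, B constructs only the unfiltered top side, derives the other three sides by repeatedly mapping a 90-degree clockwise rotation about the ring's centre over the previous side, and filters the concatenated ring against the bounds in one final pass.
import Mathlib
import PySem

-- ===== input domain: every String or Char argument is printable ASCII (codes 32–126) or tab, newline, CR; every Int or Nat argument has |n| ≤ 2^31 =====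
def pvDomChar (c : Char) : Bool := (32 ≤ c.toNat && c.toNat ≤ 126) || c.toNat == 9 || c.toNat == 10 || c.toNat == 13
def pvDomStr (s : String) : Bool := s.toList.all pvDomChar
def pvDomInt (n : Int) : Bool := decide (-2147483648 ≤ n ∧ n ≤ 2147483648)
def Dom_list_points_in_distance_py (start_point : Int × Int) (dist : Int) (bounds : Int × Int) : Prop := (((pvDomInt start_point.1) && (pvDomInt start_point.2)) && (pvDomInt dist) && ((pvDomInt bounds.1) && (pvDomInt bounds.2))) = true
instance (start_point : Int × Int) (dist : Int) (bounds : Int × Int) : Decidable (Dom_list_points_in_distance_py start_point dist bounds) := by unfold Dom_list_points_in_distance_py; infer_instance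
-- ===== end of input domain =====

-- B builds only the unfiltered top side, derives the other three sides by repeated
-- 90-degree clockwise rotation about the ring centre, and filters the ring once (alternative construction; same cost).

-- ===== PORT A =====
def list_points_in_distance_py (start_point : Int × Int) (dist : Int) (bounds : Int × Int) : List (Int × Int) :=
  if dist == 0 then [start_point]
  else
    let s_x := start_point.1
    let s_y := start_point.2
    let points : List (Int × Int) := []
    let points := (PySem.List.pyRange 0 (2 * dist - 1) 1).foldl (fun points i =>
      let x := s_x - dist + i
      let y := s_y - dist
      if x > 0 && x < bounds.1 then
        if y > 0 && y < bounds.2 then points ++ [(x, y)] else points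
      else points) points
    let points := (PySem.List.pyRange 0 (2 * dist - 1) 1).foldl (fun points i =>
      let x := s_x + dist - 1
      let y := s_y - dist + i
      if x > 0 && x < bounds.1 then
        if y > 0 && y < bounds.2 then points ++ [(x, y)] else points
      else points) points
    let points := (PySem.List.pyRange (2 * dist - 1) 0 (-1)).foldl (fun points i =>
      let x := s_x - dist + i
      let y := s_y + dist - 1
      if x > 0 && x < bounds.1 then
        if y > 0 && y < bounds.2 then points ++ [(x, y)] else points
      else points) points
    let points := (PySem.List.pyRange (2 * dist - 1) 0 (-1)).foldl (fun points i =>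
      let x := s_x - dist
      let y := s_y - dist + i
      if x > 0 && x < bounds.1 then
        if y > 0 && y < bounds.2 then points ++ [(x, y)] else points
      else points) points
    points

-- ===== PORT B =====
-- 90-degree clockwise rotation about the ring centre (s_x - 1/2, s_y - 1/2), in integers
def pvRot (s : Int × Int) (p : Int × Int) : Int × Int :=
  (s.1 + s.2 - 1 - p.2, s.2 - s.1 + p.1)

def list_points_in_distance_py_alt (start_point : Int × Int) (dist : Int) (bounds : Int × Int) : List (Int × Int) :=
  if dist == 0 then [start_point]
  else
    let s_x := start_point.1
    let s_y := start_point.2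
    let side := (PySem.List.pyRange 0 (2 * dist - 1) 1).map (fun i => (s_x - dist + i, s_y - dist))
    -- 'for _ in range(3): side = [rot(p) for p in side]; ring = ring + side'
    let st := (List.range 3).foldl
      (fun (st : List (Int × Int) × List (Int × Int)) _ =>
        let side := st.1.map (pvRot (s_x, s_y))
        (side, st.2 ++ side)) (side, side)
    st.2.filter (fun q => q.1 > 0 && q.1 < bounds.1 && q.2 > 0 && q.2 < bounds.2)

-- ===== PRECONDITION & SPEC =====
def Spec_list_points_in_distance_py (start_point : Int × Int) (dist : Int) (bounds : Int × Int) (out : List (Int × Int)) : Prop := out = list_points_in_distance_py_alt start_point dist bounds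
instance (start_point : Int × Int) (dist : Int) (bounds : Int × Int) (out : List (Int × Int)) : Decidable (Spec_list_points_in_distance_py start_point dist bounds out) := by unfold Spec_list_points_in_distance_py; infer_instance

-- ===== CLAIM (what is proved, stated in full; the proofs are below) =====
def Claim_equal_list_points_in_distance_py : Prop := ∀ (start_point : Int × Int) (dist : Int) (bounds : Int × Int), Dom_list_points_in_distance_py start_point dist bounds → Spec_list_points_in_distance_py start_point dist bounds (list_points_in_distance_py start_point dist bounds)

-- ===== LEMMAS AND PROOFS =====

-- A's side loop is 'filter ∘ map' over the range
lemma pvSide_eq (b : Int × Int) (X Y : Int → Int) (l : List Int) : ∀ (pts : List (Int × Int)),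
    l.foldl (fun pts i =>
        if X i > 0 && X i < b.1 then
          if Y i > 0 && Y i < b.2 then pts ++ [(X i, Y i)] else pts
        else pts) pts
    = pts ++ (l.map (fun i => (X i, Y i))).filter
        (fun q => q.1 > 0 && q.1 < b.1 && q.2 > 0 && q.2 < b.2) := by
  induction l with
  | nil => intro pts; simp
  | cons a l ih =>
    intro pts
    simp only [List.foldl_cons, List.map_cons, List.filter_cons]
    rw [ih]
    by_cases h1 : (X a > 0 && X a < b.1) = true <;>
      by_cases h2 : (Y a > 0 && Y a < b.2) = true <;>
        simp [h1, h2, List.append_assoc]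

-- ===== VERDICT (by name: the statement is the Claim_ definition above) =====
theorem list_points_in_distance_py_spec : Claim_equal_list_points_in_distance_py := by
  intro sp dist b _
  unfold Spec_list_points_in_distance_py list_points_in_distance_py list_points_in_distance_py_alt
  by_cases h0 : dist = 0
  · simp [h0]
  · simp only [beq_iff_eq, h0, if_false]
    rw [pvSide_eq, pvSide_eq, pvSide_eq, pvSide_eq]
    -- unfold B's three-iteration fold
    have hr : List.range 3 = [0, 1, 2] := by decide
    rw [hr]
    simp only [List.foldl_cons, List.foldl_nil, List.map_map, List.filter_append]
    rw [PySem.List.pyRange_one, PySem.List.pyRange_neg_one]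
    simp only [List.map_map, List.nil_append, Int.sub_zero]
    refine congrArg₂ (· ++ ·) (congrArg₂ (· ++ ·) (congrArg₂ (· ++ ·) ?_ ?_) ?_) ?_ <;>
      · refine congrArg _ (List.map_congr_left ?_)
        intro k hk
        simp only [List.mem_range] at hk
        simp only [Function.comp_apply, pvRot, Prod.ext_iff]
        try omega
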